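-- pv_equiv track=rewrite | github.com/DokterPP/coffee-go-drone | maze_validator.py | check_maze_edges
-- ===== SOURCE A (Python) =====
-- def check_maze_edges(maze):
--     # Ensure the maze is a rectangular grid with uniform rows and columns
--     rows = len(maze)
--     cols = len(maze[0])
--
--     # Check if all rows have the same number of columns
--     for row in maze:
--         if len(row) != cols:
--             return False
--
--     # Check if the first and last rows are all walls ('X')
--     if any(cell != 'X' for cell in maze[0]) or any(cell != 'X' for cell in maze[rows - 1]):
--         return False
--
--     # Check if the first and last columns in all rows are walls ('X')
--     for row in maze:
--         if row[0] != 'X' or row[cols - 1] != 'X':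
--             return False
--
--     return True
-- ===== SOURCE B (Python) =====
-- def check_maze_edges(maze):
--     rows = len(maze)
--     cols = len(maze[0])
--     for i, row in enumerate(maze):
--         if len(row) != cols:
--             return False
--         for j, cell in enumerate(row):
--             if (i == 0 or i == rows - 1 or j == 0 or j == cols - 1) and cell != 'X':
--                 return False
--     return True
-- ===== Notes on version B (the rewrite author's own statement) =====
-- stated objective: alternative
-- what changed: Replaces A's three separate passes (row-length check, first/last-row scan, first/last-column scan) by a single enumerate-driven traversal of the whole grid that tests boundary membership (i==0 or i==rows-1 or j==0 or j==cols-1) per cell.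
import Mathlib
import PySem

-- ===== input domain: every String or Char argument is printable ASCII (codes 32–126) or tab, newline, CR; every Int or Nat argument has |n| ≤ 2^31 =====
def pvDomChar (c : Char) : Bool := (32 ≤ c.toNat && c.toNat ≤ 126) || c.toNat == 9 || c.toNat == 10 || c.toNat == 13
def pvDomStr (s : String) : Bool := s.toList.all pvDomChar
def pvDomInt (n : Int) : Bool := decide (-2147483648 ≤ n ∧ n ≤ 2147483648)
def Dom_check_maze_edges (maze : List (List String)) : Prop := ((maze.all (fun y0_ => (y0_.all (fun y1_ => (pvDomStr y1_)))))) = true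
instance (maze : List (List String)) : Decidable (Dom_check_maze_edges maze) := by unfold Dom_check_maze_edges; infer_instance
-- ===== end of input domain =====

-- B replaces A's three separate passes by a single full-grid scan testing boundary
-- membership per cell (alternative decomposition, same asymptotic cost).


-- ===== PORT A =====
def check_maze_edges (maze : List (List String)) : Bool :=
  match maze with
  | [] => false  -- Python raises IndexError at maze[0]; excluded by Pre_
  | r0 :: _ =>
    let rows := maze.length
    let cols := r0.length
    if maze.any (fun row => row.length != cols) then false
    else if r0.any (fun cell => cell != "X")
         || ((maze[rows - 1]?).getD []).any (fun cell => cell != "X") then false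
    -- row[0] / row[cols-1]: under Pre_ this branch is only reached with every
    -- row of length cols > 0, so the getD defaults are never used
    else if maze.any (fun row =>
            ((row[0]?).getD "") != "X" || ((row[cols - 1]?).getD "") != "X") then false
    else true

-- ===== PORT B =====
-- inner loop of Source B: for j, cell in enumerate(row), from current index j
def altCells (i rows cols : Nat) : Nat → List String → Bool
  | _, [] => true
  | j, c :: cs =>
    if (i == 0 || i == rows - 1 || j == 0 || j == cols - 1) && c != "X" then false
    else altCells i rows cols (j + 1) cs

-- outer loop of Source B: for i, row in enumerate(maze), from current index i
def altRows (rows cols : Nat) : Nat → List (List String) → Bool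
  | _, [] => true
  | i, row :: rest =>
    if row.length != cols then false
    else if altCells i rows cols 0 row then altRows rows cols (i + 1) rest
    else false

def check_maze_edges_alt (maze : List (List String)) : Bool :=
  match maze with
  | [] => false  -- Python raises IndexError at maze[0]; excluded by Pre_
  | r0 :: _ => altRows maze.length r0.length 0 maze

-- ===== PRECONDITION & SPEC =====
-- Pre_ excludes exactly the inputs where Python A raises IndexError: the empty
-- maze (maze[0]) and nonempty mazes all of whose rows are empty (row[0] in the
-- third loop).
def Pre_check_maze_edges (maze : List (List String)) : Prop :=
  maze ≠ [] ∧ ∃ row ∈ maze, row.length ≠ 0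
instance (maze : List (List String)) : Decidable (Pre_check_maze_edges maze) := by
  unfold Pre_check_maze_edges; infer_instance

def pvWitness_check_maze_edges : List (List String) := [["X"]]

def Spec_check_maze_edges (maze : List (List String)) (out : Bool) : Prop := out = check_maze_edges_alt maze
instance (maze : List (List String)) (out : Bool) : Decidable (Spec_check_maze_edges maze out) := by unfold Spec_check_maze_edges; infer_instance

-- ===== CLAIM (what is proved, stated in full; the proofs are below) =====
def Claim_equal_check_maze_edges : Prop := ∀ (maze : List (List String)), Dom_check_maze_edges maze → Pre_check_maze_edges maze → Spec_check_maze_edges maze (check_maze_edges maze)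

-- ===== LEMMAS AND PROOFS =====

theorem altCells_iff (i rows cols : Nat) :
    ∀ (row : List String) (j : Nat),
      altCells i rows cols j row = true ↔
      ∀ t (ht : t < row.length),
        (i = 0 ∨ i = rows - 1 ∨ j + t = 0 ∨ j + t = cols - 1) → row[t] = "X" := by
  intro row
  induction row with
  | nil => intro j; simp [altCells]
  | cons c cs ih =>
    intro j
    simp only [altCells]
    split_ifs with h
    · simp only [Bool.and_eq_true, Bool.or_eq_true, beq_iff_eq, bne_iff_ne] at h
      constructor
      · intro hF; exact absurd hF (by simp)
      · intro hall
        exact absurd (hall 0 (by simp) (by omega)) (by simpa using h.2)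
    · rw [ih (j + 1)]
      simp only [Bool.and_eq_true, Bool.or_eq_true, beq_iff_eq, bne_iff_ne, not_and,
        not_not] at h
      constructor
      · intro htail t ht hb
        cases t with
        | zero =>
          simp only [Nat.add_zero] at hb
          simp only [List.getElem_cons_zero]
          by_cases hx : c = "X"
          · exact hx
          · exact absurd hx (by simpa using h (by tauto))
        | succ t' =>
          have := htail t' (by simpa using ht) (by omega)
          simpa using this
      · intro hall t ht hb
        have := hall (t + 1) (by simpa using ht) (by omega)
        simpa using this

theorem altRows_iff (rows cols : Nat) :
    ∀ (l : List (List String)) (i : Nat),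
      altRows rows cols i l = true ↔
      ∀ k (hk : k < l.length),
        l[k].length = cols ∧ altCells (i + k) rows cols 0 l[k] = true := by
  intro l
  induction l with
  | nil => intro i; simp [altRows]
  | cons row rest ih =>
    intro i
    simp only [altRows]
    split_ifs with h1 h2
    · simp only [bne_iff_ne, ne_eq] at h1
      constructor
      · intro hF; exact absurd hF (by simp)
      · intro hall; exact absurd (hall 0 (by simp)).1 (by simpa using h1)
    · rw [ih (i + 1)]
      constructor
      · intro htail k hk
        cases k with
        | zero =>
          refine ⟨by simpa using h1, by simpa using h2⟩
        | succ k' =>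
          have := htail k' (by simpa using hk)
          simpa [Nat.add_comm, Nat.add_assoc, Nat.add_left_comm] using this
      · intro hall k hk
        have := hall (k + 1) (by simpa using hk)
        simpa [Nat.add_comm, Nat.add_assoc, Nat.add_left_comm] using this
    · constructor
      · intro hF; exact absurd hF (by simp)
      · intro hall
        exact absurd (by simpa using (hall 0 (by simp)).2) h2

theorem check_maze_edges_spec : Claim_equal_check_maze_edges := by
  intro maze _hdom hpre
  unfold Spec_check_maze_edges
  obtain ⟨hne, row0, hrow0mem, hrow0len⟩ := hpre
  match maze with
  | [] => exact absurd rfl hne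
  | r0 :: rest =>
    clear hne
    rw [Bool.eq_iff_iff]
    simp only [check_maze_edges, check_maze_edges_alt]
    set maze := r0 :: rest with hmz
    set n := maze.length with hn
    set cols := r0.length with hcols
    have hnpos : 0 < n := by simp [hn, hmz]
    -- case split: rectangular or not
    by_cases hrect : ∀ k (hk : k < n), maze[k].length = cols
    · -- rectangular; then cols > 0 by Pre_
      have hcpos : 0 < cols := by
        obtain ⟨k, hk, hke⟩ := List.mem_iff_getElem.mp hrow0mem
        have := hrect k (by simpa [hn] using hk)
        rw [hke] at this
        omega
      have hany1 : maze.any (fun row => row.length != cols) = false := by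
        simp only [List.any_eq_false, bne_iff_ne, ne_eq, not_not]
        intro row hrow
        obtain ⟨k, hk, hke⟩ := List.mem_iff_getElem.mp hrow
        rw [← hke]; exact hrect k (by simpa [hn] using hk)
      have hlast : maze[n - 1]? = some maze[n - 1] := by
        exact List.getElem?_eq_getElem (by omega)
      rw [altRows_iff]
      simp only [hany1, Bool.false_eq_true, if_false, hlast, Option.getD_some,
        Bool.or_eq_true, List.any_eq_true, bne_iff_ne, ne_eq]
      constructor
      · -- A = true → B characterization
        intro hA
        split_ifs at hA with h2 h3
        push Not at h2 h3
        intro k hk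
        refine ⟨hrect k hk, ?_⟩
        rw [altCells_iff]
        intro t ht hb
        rcases hb with hb | hb | hb | hb
        · -- first row
          have hk0 : k = 0 := by omega
          subst hk0
          exact h2.1 _ (List.getElem_mem (by exact ht))
        · -- last row
          have hkn : k = n - 1 := by omega
          subst hkn
          exact h2.2 _ (List.getElem_mem (by exact ht))
        · -- first column
          have ht0 : t = 0 := by omega
          subst ht0
          have h := (h3 _ (List.getElem_mem hk)).1
          rw [List.getElem?_eq_getElem (by omega)] at h
          simpa using h
        · -- last column
          have hlen := hrect k hk
          have htc : t = cols - 1 := by omega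
          subst htc
          have h := (h3 _ (List.getElem_mem hk)).2
          rw [List.getElem?_eq_getElem (by omega)] at h
          simpa using h
      · -- B characterization → A = true
        intro hB
        have hcell : ∀ k (hk : k < n) t (ht : t < maze[k].length),
            (k = 0 ∨ k = n - 1 ∨ t = 0 ∨ t = cols - 1) → maze[k][t] = "X" := by
          intro k hk t ht hb
          have := (hB k hk).2
          rw [altCells_iff] at this
          exact this t ht (by omega)
        have h2 : ¬((∃ x ∈ r0, ¬x = "X") ∨ ∃ x ∈ maze[n - 1], ¬x = "X") := by
          push Not
          constructor
          · intro x hx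
            obtain ⟨t, ht, hte⟩ := List.mem_iff_getElem.mp hx
            rw [← hte]
            exact hcell 0 hnpos t (by exact ht) (Or.inl rfl)
          · intro x hx
            obtain ⟨t, ht, hte⟩ := List.mem_iff_getElem.mp hx
            rw [← hte]
            exact hcell (n - 1) (by omega) t (by exact ht) (Or.inr (Or.inl rfl))
        have h3 : ¬∃ row ∈ maze, ¬(row[0]?).getD "" = "X" ∨ ¬(row[cols - 1]?).getD "" = "X" := by
          push Not
          intro row hrow
          obtain ⟨k, hk, hke⟩ := List.mem_iff_getElem.mp hrow
          subst hke
          have hk' : k < n := by simpa [hn] using hk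
          have hlen := hrect k hk'
          refine ⟨?_, ?_⟩
          · rw [List.getElem?_eq_getElem (by omega)]
            simpa using hcell k hk' 0 (by omega) (by tauto)
          · rw [List.getElem?_eq_getElem (by omega)]
            simpa using hcell k hk' (cols - 1) (by omega) (by tauto)
        rw [if_neg h2, if_neg h3]
    · -- not rectangular: both false
      push Not at hrect
      obtain ⟨k, hk, hke⟩ := hrect
      have hany1 : maze.any (fun row => row.length != cols) = true := by
        simp only [List.any_eq_true, bne_iff_ne, ne_eq]
        exact ⟨maze[k], List.getElem_mem hk, hke⟩
      rw [hany1, if_pos rfl]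
      rw [altRows_iff]
      constructor
      · intro h; exact absurd h (by simp)
      · intro hall; exact absurd ((hall k hk).1) hke
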